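-- pv_equiv track=rewrite | github.com/aadam2/crypto | tf-cs-cipher.py | xoring_list_of_lists
-- ===== SOURCE A (Python) =====
-- def xoring_two_lists(list_A, list_B):
--     xored_list = []
--     list_size = len(list_A)
--     for i in range(list_size):
--         xored_list.append(list_A[i] ^ list_B[i])
--     return xored_list
--
-- def xoring_list_of_lists(subkeys_list):
--     nb_lists = len(subkeys_list)
--     last_subkey = subkeys_list[0]
--     for i in range(1, nb_lists):
--         last_subkey = xoring_two_lists(last_subkey,subkeys_list[i])
--
--     C = [0, 0, 0, 1, 1, 0, 1, 1, 1, 1, 0, 1, 0, 0, 0, 1, 0, 0, 0, 1, 1, 0, 1, 1, 1, 1, 0, 1, 1, 0, 1, 0, 1, 0, 1, 0, 1, 0, 0, 1, 1, 1, 1, 1, 1, 1, 0, 0, 0, 0, 0, 1, 1, 0, 1, 0, 0, 0, 1, 0, 0, 0, 1, 0]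
--     last_subkey = xoring_two_lists(last_subkey, C)
--     return last_subkey
-- ===== SOURCE B (Python) =====
-- def xoring_list_of_lists(subkeys_list):
--     C = [0, 0, 0, 1, 1, 0, 1, 1, 1, 1, 0, 1, 0, 0, 0, 1, 0, 0, 0, 1, 1, 0, 1, 1, 1, 1, 0, 1, 1, 0, 1, 0, 1, 0, 1, 0, 1, 0, 0, 1, 1, 1, 1, 1, 1, 1, 0, 0, 0, 0, 0, 1, 1, 0, 1, 0, 0, 0, 1, 0, 0, 0, 1, 0]
--     first, *rest = subkeys_list
--     out = []
--     for i in range(len(first)):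
--         v = first[i]
--         for row in rest:
--             v ^= row[i]
--         out.append(v ^ C[i])
--     return out
-- ===== Notes on version B (the rewrite author's own statement) =====
-- stated objective: alternative
-- what changed: B computes the result column-major in one pass (for each bit position, XOR that position across all subkeys and the constant), instead of A's repeated pairwise list-XOR folds that allocate an intermediate list per subkey.
import Mathlib
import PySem

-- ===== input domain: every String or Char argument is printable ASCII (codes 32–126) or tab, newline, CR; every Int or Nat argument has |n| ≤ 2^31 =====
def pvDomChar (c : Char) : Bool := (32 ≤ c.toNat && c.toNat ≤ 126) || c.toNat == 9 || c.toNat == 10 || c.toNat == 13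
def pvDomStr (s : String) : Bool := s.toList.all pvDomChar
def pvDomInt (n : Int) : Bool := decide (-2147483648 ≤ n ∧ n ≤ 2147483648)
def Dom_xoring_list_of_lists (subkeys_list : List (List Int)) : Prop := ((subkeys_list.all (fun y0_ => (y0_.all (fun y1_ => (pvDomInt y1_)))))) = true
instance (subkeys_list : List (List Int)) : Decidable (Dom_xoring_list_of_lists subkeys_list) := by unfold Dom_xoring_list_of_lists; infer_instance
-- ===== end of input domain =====

-- B computes the output column-major in a single pass over bit positions instead of A's
-- repeated pairwise list-XOR folds; same values, no intermediate lists.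

-- ===== PORT A =====
-- the constant C, as written in both A and B (shared data, used by both ports)
def cConst : List Int := [0, 0, 0, 1, 1, 0, 1, 1, 1, 1, 0, 1, 0, 0, 0, 1, 0, 0, 0, 1, 1, 0, 1, 1, 1, 1, 0, 1, 1, 0, 1, 0, 1, 0, 1, 0, 1, 0, 0, 1, 1, 1, 1, 1, 1, 1, 0, 0, 0, 0, 0, 1, 1, 0, 1, 0, 0, 0, 1, 0, 0, 0, 1, 0]

def xoring_two_lists (listA listB : List Int) : List Int :=
  (PySem.List.pyRange 0 (listA.length : Int) 1).foldl
    (fun xored i => xored ++ [PySem.Int.bxor (PySem.List.pyGetD listA i 0) (PySem.List.pyGetD listB i 0)]) []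

def xoring_list_of_lists (subkeys_list : List (List Int)) : List Int :=
  let nb_lists : Int := (subkeys_list.length : Int)
  let last_subkey := PySem.List.pyGetD subkeys_list 0 []
  let last_subkey :=
    (PySem.List.pyRange 1 nb_lists 1).foldl
      (fun last i => xoring_two_lists last (PySem.List.pyGetD subkeys_list i [])) last_subkey
  xoring_two_lists last_subkey cConst

-- ===== PORT B =====
def xoring_list_of_lists_alt (subkeys_list : List (List Int)) : List Int :=
  -- 'first, *rest = subkeys_list' (raises on []; excluded by Pre_): first = subkeys_list[0], rest = the remainder
  let first := PySem.List.pyGetD subkeys_list 0 []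
  let rest := subkeys_list.drop 1
  (PySem.List.pyRange 0 (first.length : Int) 1).foldl
    (fun out i =>
      let v := rest.foldl (fun v row => PySem.Int.bxor v (PySem.List.pyGetD row i 0))
                 (PySem.List.pyGetD first i 0)
      out ++ [PySem.Int.bxor v (PySem.List.pyGetD cConst i 0)]) []

-- ===== PRECONDITION & SPEC =====
-- Pre_ excludes exactly the inputs where Python A raises IndexError: the empty list, a first
-- subkey longer than the 64-bit constant C, or a later subkey shorter than the first.
def Pre_xoring_list_of_lists (subkeys_list : List (List Int)) : Prop :=
  subkeys_list ≠ [] ∧ (subkeys_list.headD []).length ≤ 64 ∧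
    ∀ l ∈ subkeys_list, (subkeys_list.headD []).length ≤ l.length
instance (subkeys_list : List (List Int)) : Decidable (Pre_xoring_list_of_lists subkeys_list) := by
  unfold Pre_xoring_list_of_lists; infer_instance

def pvWitness_xoring_list_of_lists : List (List Int) := [[0, 1, 1], [1, 0, 1]]

def Spec_xoring_list_of_lists (subkeys_list : List (List Int)) (out : List Int) : Prop := out = xoring_list_of_lists_alt subkeys_list
instance (subkeys_list : List (List Int)) (out : List Int) : Decidable (Spec_xoring_list_of_lists subkeys_list out) := by unfold Spec_xoring_list_of_lists; infer_instance

-- ===== CLAIM (what is proved, stated in full; the proofs are below) =====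
def Claim_equal_xoring_list_of_lists : Prop := ∀ (subkeys_list : List (List Int)), Dom_xoring_list_of_lists subkeys_list → Pre_xoring_list_of_lists subkeys_list → Spec_xoring_list_of_lists subkeys_list (xoring_list_of_lists subkeys_list)

-- ===== LEMMAS AND PROOFS =====

-- A's pairwise XOR loop, as a map over indices
theorem xtl_eq_map (listA listB : List Int) :
    xoring_two_lists listA listB =
      (List.range listA.length).map (fun k => PySem.Int.bxor (listA.getD k 0) (listB.getD k 0)) := by
  unfold xoring_two_lists
  rw [PySem.List.pyRange_zero_nat, List.foldl_map, PySem.List.foldl_append_singleton_eq_map]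
  simp

theorem map_getD_range (l : List Int) :
    (List.range l.length).map (fun k => l.getD k 0) = l := by
  apply List.ext_getElem
  · simp
  · intro i h1 h2
    simp [List.getElem?_eq_getElem h2]

-- invariant of A's fold over the remaining subkeys, read column-wise
theorem foldl_xtl_map (rs : List (List Int)) (n : Nat) (g : Nat → Int) :
    rs.foldl xoring_two_lists ((List.range n).map g) =
      (List.range n).map (fun k => rs.foldl (fun v row => PySem.Int.bxor v (row.getD k 0)) (g k)) := by
  induction rs generalizing g with
  | nil => rfl
  | cons r rs ih =>
      simp only [List.foldl_cons]
      rw [xtl_eq_map, List.length_map, List.length_range]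
      rw [List.map_congr_left (fun k hk =>
        by rw [PySem.List.getD_map_range _ _ _ _ (List.mem_range.mp hk)])]
      exact ih _

theorem foldl_xtl_eq (rs : List (List Int)) (acc : List Int) :
    rs.foldl xoring_two_lists acc =
      (List.range acc.length).map
        (fun k => rs.foldl (fun v row => PySem.Int.bxor v (row.getD k 0)) (acc.getD k 0)) := by
  conv_lhs => rw [← map_getD_range acc]
  rw [foldl_xtl_map]

-- ===== VERDICT (by name: the statement is the Claim_ definition above) =====
theorem xoring_list_of_lists_spec : Claim_equal_xoring_list_of_lists := by
  intro s _ hpre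
  obtain ⟨hne, -, -⟩ := hpre
  obtain ⟨h, t, rfl⟩ := List.exists_cons_of_ne_nil hne
  unfold Spec_xoring_list_of_lists xoring_list_of_lists xoring_list_of_lists_alt
  simp only [PySem.List.pyGetD_zero_cons, List.drop_succ_cons, List.drop_zero]
  rw [PySem.List.foldl_pyRange_pyGetD' (h :: t) [] xoring_two_lists h (by omega)]
  simp only [Int.toNat_one, List.drop_succ_cons, List.drop_zero]
  rw [foldl_xtl_eq, xtl_eq_map]
  rw [PySem.List.pyRange_zero_nat, List.foldl_map, PySem.List.foldl_append_singleton_eq_map]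
  simp only [List.length_map, List.length_range, List.nil_append, PySem.List.pyGetD_natCast]
  apply List.map_congr_left
  intro k hk
  rw [PySem.List.getD_map_range _ _ _ _ (List.mem_range.mp hk)]
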